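-- pv_equiv track=rewrite | github.com/noahjacknichols/cp460 | Midterm/solution_A2.py | formatInput_playfair
-- ===== SOURCE A (Python) =====
-- def remove_nonalpha(text):
--     modifiedText = ''
--     for letter in text:
--         if(letter.isalpha() == True):
--             modifiedText += letter.upper()
--
--     return modifiedText
--
-- def formatInput_playfair(plaintext):
--     # your code here
--     modifiedPlain = ''
--
--     plaintext = remove_nonalpha(plaintext)
--     n = len(plaintext)
--     i = 0
--
--     while i < n:
--         if plaintext[i] == "W":
--             plaintext = plaintext[:i] + "VV" + plaintext[i+1:]
--             n+=1
--         i+=1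
--     if(len(plaintext) % 2 > 0):
--         plaintext+='X'
--     for i in range(len(plaintext)):
--         if i % 2 == 0 and i != 0:
--             modifiedPlain += ' '
--             modifiedPlain += plaintext[i]
--         else:
--             modifiedPlain += plaintext[i]
--     for i in range(len(modifiedPlain)):
--         if i != 0:
--             if modifiedPlain[i-1] == modifiedPlain[i]:
--                 modifiedPlain = modifiedPlain[:i] + 'X' + modifiedPlain[i+1:]
--
--     return modifiedPlain
-- ===== SOURCE B (Python) =====
-- def formatInput_playfair(plaintext):
--     # Build the cleaned letter string: keep alphabetic chars, uppercase, expand W -> VV.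
--     letters = ''.join(
--         'VV' if c.upper() == 'W' else c.upper()
--         for c in plaintext if c.isalpha()
--     )
--     if len(letters) % 2 == 1:
--         letters += 'X'
--     pairs = []
--     for k in range(0, len(letters), 2):
--         a, b = letters[k], letters[k + 1]
--         pairs.append(a + ('X' if a == b else b))
--     return ' '.join(pairs)
-- ===== Notes on version B (the rewrite author's own statement) =====
-- stated objective: faster
-- what changed: B builds the cleaned/padded letter string in one pass (filter+uppercase with W->VV expansion), then emits it two letters at a time (X-ing the second letter of an equal pair) and joins with spaces, replacing A's in-place W-splicing index scan, index-driven spacing pass and second in-place adjacent-dedup splice scan (each splice rebuilds the whole string) over the spaced string.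
import Mathlib
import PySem

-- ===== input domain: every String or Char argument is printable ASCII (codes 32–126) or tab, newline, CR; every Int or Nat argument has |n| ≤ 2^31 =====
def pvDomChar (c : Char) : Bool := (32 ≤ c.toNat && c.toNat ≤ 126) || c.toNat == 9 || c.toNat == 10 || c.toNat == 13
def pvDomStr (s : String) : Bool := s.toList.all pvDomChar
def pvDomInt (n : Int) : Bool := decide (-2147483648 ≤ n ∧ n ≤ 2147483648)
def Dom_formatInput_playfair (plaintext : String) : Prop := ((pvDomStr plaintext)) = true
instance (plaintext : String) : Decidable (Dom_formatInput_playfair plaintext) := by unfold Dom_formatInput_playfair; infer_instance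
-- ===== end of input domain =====

-- B builds the padded letter string once and emits it pairwise (dedup per 2-chunk), replacing
-- A's in-place W-splice scan, index-driven spacing pass and in-place adjacent-dedup rescan: simpler.

-- ===== PORT A =====

-- remove_nonalpha: fold over the characters, appending the uppercased letter when alphabetic
def removeNonalpha (text : List Char) : List Char :=
  text.foldl (fun acc c =>
    if PySem.Chars.isalpha c = true then acc ++ [PySem.Chars.upperChar c] else acc) []

-- the 'while i < n' W-splicing loop; plaintext[i] is in range throughout (the none branch is
-- an unreachable totality guard)
def expandLoopA (cs : List Char) (n i : Nat) : List Char :=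
  if _h : i < n then
    match hg : cs[i]? with
    | some c =>
      if hW : c = 'W' then
        expandLoopA (cs.take i ++ 'V' :: 'V' :: cs.drop (i+1)) (n+1) (i+1)
      else
        expandLoopA cs n (i+1)
    | none => cs
  else cs
termination_by (n - i) + ((cs.drop i).count 'W')
decreasing_by
  · have hi : i < cs.length := (List.getElem?_eq_some_iff.mp hg).1
    have hc : cs[i] = c := (List.getElem?_eq_some_iff.mp hg).2
    have hd : cs.drop i = c :: cs.drop (i+1) := by
      rw [List.drop_eq_getElem_cons hi, hc]
    have hdrop : (cs.take i ++ 'V' :: 'V' :: cs.drop (i+1)).drop (i+1)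
        = 'V' :: cs.drop (i+1) := by
      have h2 : i + 1 = (cs.take i).length + 1 := by simp [List.length_take]; omega
      rw [h2, List.drop_append]
      simp
    rw [hdrop, hd, hW, List.count_cons_self, List.count_cons_of_ne (by decide)]
    omega
  · have hi : i < cs.length := (List.getElem?_eq_some_iff.mp hg).1
    have hc : cs[i] = c := (List.getElem?_eq_some_iff.mp hg).2
    have hd : cs.drop i = c :: cs.drop (i+1) := by
      rw [List.drop_eq_getElem_cons hi, hc]
    rw [hd, List.count_cons]
    simp only [beq_iff_eq, hW, if_false]
    omega

-- first for-loop: insert a space before every even (nonzero) index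
def spacedLoopA (p : List Char) : List Char :=
  (List.range p.length).foldl
    (fun acc i =>
      if i % 2 = 0 ∧ i ≠ 0 then (acc ++ [' ']) ++ [p.getD i ' ']
      else acc ++ [p.getD i ' ']) []

-- second for-loop: in-place splice replacing a char equal to its predecessor by 'X'
def dedupLoopA (m0 : List Char) : List Char :=
  (List.range m0.length).foldl
    (fun m i =>
      if i ≠ 0 then
        (if m.getD (i-1) ' ' = m.getD i ' ' then m.take i ++ 'X' :: m.drop (i+1) else m)
      else m) m0

def formatInput_playfair (plaintext : String) : String :=
  let p1 := removeNonalpha plaintext.toList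
  let p2 := expandLoopA p1 p1.length 0
  let p3 := if p2.length % 2 > 0 then p2 ++ ['X'] else p2
  String.mk (dedupLoopA (spacedLoopA p3))

-- ===== PORT B =====

-- the range(0, len, 2) loop of Source B: one pair per step, second letter X'd when equal
def pairLoopB : List Char → List (List Char)
  | a :: b :: rest => [a, if a = b then 'X' else b] :: pairLoopB rest
  | _ => []

-- ' '.join
def joinSpaceB : List (List Char) → List Char
  | [] => []
  | [p] => p
  | p :: ps => p ++ ' ' :: joinSpaceB ps

def formatInput_playfair_alt (plaintext : String) : String :=
  let letters := plaintext.toList.flatMap (fun c =>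
    if PySem.Chars.isalpha c = true then
      (if PySem.Chars.upperChar c = 'W' then ['V', 'V'] else [PySem.Chars.upperChar c])
    else [])
  let letters2 := if letters.length % 2 = 1 then letters ++ ['X'] else letters
  String.mk (joinSpaceB (pairLoopB letters2))

-- ===== PRECONDITION & SPEC =====
def Spec_formatInput_playfair (plaintext : String) (out : String) : Prop := out = formatInput_playfair_alt plaintext
instance (plaintext : String) (out : String) : Decidable (Spec_formatInput_playfair plaintext out) := by unfold Spec_formatInput_playfair; infer_instance

-- ===== CLAIM (what is proved, stated in full; the proofs are below) =====
def Claim_equal_formatInput_playfair : Prop := ∀ (plaintext : String), Dom_formatInput_playfair plaintext → Spec_formatInput_playfair plaintext (formatInput_playfair plaintext)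

-- ===== LEMMAS AND PROOFS =====

-- uppercasing an alphabetic character never yields a space
theorem upper_ne_space (c : Char) (h : PySem.Chars.isalpha c = true) :
    PySem.Chars.upperChar c ≠ ' ' := by
  have hval : ∀ a b : Char, a ≤ b ↔ a.toNat ≤ b.toNat := by
    intro a b; rw [Char.le_def, UInt32.le_iff_toNat_le]; rfl
  have e1 : (('a' : Char).toNat) = 97 := rfl
  have e2 : (('z' : Char).toNat) = 122 := rfl
  have e3 : (('A' : Char).toNat) = 65 := rfl
  have e4 : (('Z' : Char).toNat) = 90 := rfl
  have e5 : ((' ' : Char).toNat) = 32 := rfl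
  simp only [PySem.Chars.isalpha, PySem.Chars.isupper, PySem.Chars.islower, PySem.Chars.upperChar,
    Bool.or_eq_true, Bool.and_eq_true, decide_eq_true_eq] at *
  split
  · next hl =>
    simp only [hval, e1, e2] at hl
    intro he
    have h2 := congrArg Char.toNat he
    rw [Char.toNat_ofNat, if_pos (by left; omega), e5] at h2
    omega
  · next hl =>
    simp only [hval, e1, e2, e3, e4] at h
    intro he
    rw [he] at h
    simp only [e5] at h
    omega

-- W-expansion of one character
def expW (c : Char) : List Char := if c = 'W' then ['V', 'V'] else [c]

-- the unmodified 2-chunks of a list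
def chunk2 : List Char → List (List Char)
  | a :: b :: rest => [a, b] :: chunk2 rest
  | _ => []

-- space-prefixed pair join (raw / dedup'd)
def sjoin : List Char → List Char
  | a :: b :: r => ' ' :: a :: b :: sjoin r
  | _ => []

def sjoin' : List Char → List Char
  | a :: b :: r => ' ' :: a :: (if a = b then 'X' else b) :: sjoin' r
  | _ => []

-- the dedup scan as a left-to-right pass carrying the (already updated) previous char
def dscan (prev : Char) : List Char → List Char
  | [] => []
  | c :: rest =>
    let c' := if prev = c then 'X' else c
    c' :: dscan c' rest

theorem dscan_nil (p : Char) : dscan p [] = [] := rfl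

theorem dscan_cons (p c : Char) (rest : List Char) :
    dscan p (c :: rest) = (if p = c then 'X' else c) :: dscan (if p = c then 'X' else c) rest := rfl

theorem removeNonalpha_eq (text : List Char) :
    removeNonalpha text = (text.filter (fun c => PySem.Chars.isalpha c)).map PySem.Chars.upperChar := by
  have key : ∀ (t : List Char) (acc : List Char),
      t.foldl (fun acc c =>
        if PySem.Chars.isalpha c = true then acc ++ [PySem.Chars.upperChar c] else acc) acc
      = acc ++ (t.filter (fun c => PySem.Chars.isalpha c)).map PySem.Chars.upperChar := by
    intro t
    induction t with
    | nil => simp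
    | cons c t ih =>
      intro acc
      by_cases hc : PySem.Chars.isalpha c = true
      · simp [List.foldl_cons, hc, ih]
      · simp [List.foldl_cons, hc, ih]
  simpa using key text []

theorem expandLoopA_eq (cs : List Char) (n i : Nat) (hn : n = cs.length) :
    expandLoopA cs n i = cs.take i ++ (cs.drop i).flatMap expW := by
  revert hn
  fun_induction expandLoopA cs n i with
  | case1 cs n i h hg ih =>
    intro hn
    have hi : i < cs.length := (List.getElem?_eq_some_iff.mp hg).1
    have hc : cs[i] = 'W' := (List.getElem?_eq_some_iff.mp hg).2
    have hlen : (cs.take i).length = i := by simp [List.length_take]; omega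
    have hlen' : n + 1 = (cs.take i ++ 'V' :: 'V' :: cs.drop (i+1)).length := by
      simp [List.length_append, hlen, List.length_drop]; omega
    rw [ih hlen']
    have htake : (cs.take i ++ 'V' :: 'V' :: cs.drop (i+1)).take (i+1)
        = cs.take i ++ ['V'] := by
      rw [List.take_append, hlen]
      simp
    have hdrop : (cs.take i ++ 'V' :: 'V' :: cs.drop (i+1)).drop (i+1)
        = 'V' :: cs.drop (i+1) := by
      rw [show i + 1 = (cs.take i).length + 1 by omega, List.drop_append]
      simp
    have hd : cs.drop i = 'W' :: cs.drop (i+1) := by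
      rw [List.drop_eq_getElem_cons hi, hc]
    rw [htake, hdrop, hd]
    simp [expW]
  | case2 cs n i h c hg hW ih =>
    intro hn
    have hi : i < cs.length := (List.getElem?_eq_some_iff.mp hg).1
    have hc : cs[i] = c := (List.getElem?_eq_some_iff.mp hg).2
    rw [ih hn]
    have htake : cs.take (i+1) = cs.take i ++ [c] := by
      rw [List.take_add_one]
      simp [List.getElem?_eq_some_iff.mpr ⟨hi, hc⟩]
    have hd : cs.drop i = c :: cs.drop (i+1) := by
      rw [List.drop_eq_getElem_cons hi, hc]
    rw [htake, hd]
    simp [expW, hW]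
  | case3 cs n i h hg =>
    intro hn
    have : cs.length ≤ i := List.getElem?_eq_none_iff.mp hg
    omega
  | case4 cs n i h =>
    intro hn
    have hle : cs.length ≤ i := by omega
    simp [List.take_of_length_le hle, List.drop_of_length_le hle]

-- B's letter builder equals A's (filter∘map then W-expand)
theorem lettersB_eq (t : List Char) :
    t.flatMap (fun c =>
      if PySem.Chars.isalpha c = true then
        (if PySem.Chars.upperChar c = 'W' then ['V', 'V'] else [PySem.Chars.upperChar c])
      else [])
    = ((t.filter (fun c => PySem.Chars.isalpha c)).map PySem.Chars.upperChar).flatMap expW := by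
  induction t with
  | nil => simp
  | cons c t ih =>
    by_cases hc : PySem.Chars.isalpha c = true
    · simp [hc, ih, expW]
    · simp [hc, ih]

theorem foldl_app (l : List Nat) (g : Nat → List Char) :
    ∀ acc : List Char, l.foldl (fun a i => a ++ g i) acc = acc ++ l.flatMap g := by
  induction l with
  | nil => simp
  | cons x l ih => intro acc; simp [List.foldl_cons, ih]

theorem spacedLoopA_flat (p : List Char) :
    spacedLoopA p = (List.range p.length).flatMap
      (fun i => if i % 2 = 0 ∧ i ≠ 0 then [' ', p.getD i ' '] else [p.getD i ' ']) := by
  unfold spacedLoopA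
  have hfun : (fun (acc : List Char) i =>
      if i % 2 = 0 ∧ i ≠ 0 then (acc ++ [' ']) ++ [p.getD i ' '] else acc ++ [p.getD i ' '])
      = fun acc i => acc ++ (if i % 2 = 0 ∧ i ≠ 0 then [' ', p.getD i ' '] else [p.getD i ' ']) := by
    funext acc i
    split <;> simp
  rw [hfun, foldl_app]
  simp

theorem range'_flat (r : List Char) : ∀ (k : Nat) (L : List Char),
    r.length % 2 = 0 → 2 ≤ k → k % 2 = 0 →
    (∀ j, j < r.length → L.getD (k + j) ' ' = r.getD j ' ') →
    (List.range' k r.length).flatMap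
      (fun i => if i % 2 = 0 ∧ i ≠ 0 then [' ', L.getD i ' '] else [L.getD i ' ']) = sjoin r := by
  induction r using sjoin.induct with
  | case1 a b r ih =>
    intro k L hev hk2 hkmod hget
    have h0 : L.getD k ' ' = a := by simpa using hget 0 (by simp)
    have h1 : L.getD (k+1) ' ' = b := by simpa using hget 1 (by simp)
    have hlen : (a :: b :: r).length = r.length + 2 := by simp
    rw [hlen]
    have hrg : List.range' k (r.length + 2) = k :: (k+1) :: List.range' (k+2) r.length := by
      rw [show r.length + 2 = (r.length + 1) + 1 from rfl, List.range'_succ, List.range'_succ]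
    rw [hrg]
    simp only [List.flatMap_cons]
    rw [if_pos ⟨hkmod, by omega⟩, if_neg (by omega)]
    rw [h0, h1]
    have hrev : r.length % 2 = 0 := by simp at hev; omega
    have ihr := ih (k+2) L hrev (by omega) (by omega) (by
      intro j hj
      have := hget (j+2) (by simp; omega)
      simpa [show k + (j + 2) = k + 2 + j by omega] using this)
    rw [ihr]
    simp [sjoin]
  | case2 r hne =>
    intro k L hev hk2 hkmod hget
    rcases r with _ | ⟨x, _ | ⟨y, r'⟩⟩
    · simp [sjoin]
    · simp at hev
    · exact absurd rfl (hne x y r')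

theorem joinSpaceB_chunk2 (r : List Char) :
    ∀ a b, joinSpaceB (chunk2 (a :: b :: r)) = a :: b :: sjoin r := by
  induction r using chunk2.induct with
  | case1 c d r' ih =>
    intro a b
    rw [show chunk2 (a :: b :: c :: d :: r') = [a, b] :: chunk2 (c :: d :: r') from rfl]
    rw [show joinSpaceB ([a, b] :: chunk2 (c :: d :: r'))
        = [a, b] ++ ' ' :: joinSpaceB (chunk2 (c :: d :: r')) by
      rw [show chunk2 (c :: d :: r') = [c, d] :: chunk2 r' from rfl]; rfl]
    rw [ih c d]
    simp [sjoin]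
  | case2 r hne =>
    intro a b
    rcases r with _ | ⟨x, _ | ⟨y, r'⟩⟩
    · simp [chunk2, joinSpaceB, sjoin]
    · simp [chunk2, joinSpaceB, sjoin]
    · exact absurd rfl (hne x y r')

theorem joinSpaceB_pairLoopB (r : List Char) :
    ∀ a b, joinSpaceB (pairLoopB (a :: b :: r)) = a :: (if a = b then 'X' else b) :: sjoin' r := by
  induction r using chunk2.induct with
  | case1 c d r' ih =>
    intro a b
    rw [show pairLoopB (a :: b :: c :: d :: r')
        = [a, if a = b then 'X' else b] :: pairLoopB (c :: d :: r') from rfl]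
    rw [show joinSpaceB ([a, if a = b then 'X' else b] :: pairLoopB (c :: d :: r'))
        = [a, if a = b then 'X' else b] ++ ' ' :: joinSpaceB (pairLoopB (c :: d :: r')) by
      rw [show pairLoopB (c :: d :: r') = [c, if c = d then 'X' else d] :: pairLoopB r' from rfl]
      rfl]
    rw [ih c d]
    simp [sjoin']
  | case2 r hne =>
    intro a b
    rcases r with _ | ⟨x, _ | ⟨y, r'⟩⟩
    · simp [pairLoopB, joinSpaceB, sjoin']
    · simp [pairLoopB, joinSpaceB, sjoin']
    · exact absurd rfl (hne x y r')

theorem spacedLoopA_eq (L : List Char) (he : L.length % 2 = 0) :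
    spacedLoopA L = joinSpaceB (chunk2 L) := by
  rw [spacedLoopA_flat]
  rcases L with _ | ⟨a, _ | ⟨b, r⟩⟩
  · simp [chunk2, joinSpaceB]
  · simp at he
  · have hr : r.length % 2 = 0 := by simp at he; omega
    have hlen : (a :: b :: r).length = r.length + 2 := by simp
    rw [hlen, List.range_eq_range']
    rw [show List.range' 0 (r.length + 2) = 0 :: 1 :: List.range' 2 r.length by
      rw [show r.length + 2 = (r.length + 1) + 1 from rfl, List.range'_succ, List.range'_succ]]
    simp only [List.flatMap_cons]
    rw [if_neg (by simp), if_neg (by simp)]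
    rw [range'_flat r 2 (a :: b :: r) hr (by omega) (by omega) (by
      intro j _
      simp [show (2 : Nat) + j = j + 2 by omega])]
    rw [joinSpaceB_chunk2]
    simp

-- the index/splice dedup fold, rephrased as dscan
theorem dedup_fold (d : Nat) : ∀ (j : Nat) (m : List Char), 1 ≤ j → j + d = m.length →
    (List.range' j d).foldl
      (fun m i =>
        if i ≠ 0 then
          (if m.getD (i-1) ' ' = m.getD i ' ' then m.take i ++ 'X' :: m.drop (i+1) else m)
        else m) m
    = m.take j ++ dscan (m.getD (j-1) ' ') (m.drop j) := by
  induction d with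
  | zero =>
    intro j m h1 hlen
    have hj : m.length ≤ j := by omega
    simp [List.take_of_length_le hj, List.drop_of_length_le hj, dscan_nil]
  | succ d ih =>
    intro j m h1 hlen
    have hj : j < m.length := by omega
    rw [List.range'_succ, List.foldl_cons]
    rw [if_pos (by omega : j ≠ 0)]
    have hgD : m.getD j ' ' = m[j] := List.getD_eq_getElem m ' ' hj
    have hdj : m.drop j = m[j] :: m.drop (j+1) := List.drop_eq_getElem_cons hj
    have htlen : (m.take j).length = j := by simp [List.length_take]; omega
    by_cases heq : m.getD (j-1) ' ' = m.getD j ' '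
    · rw [if_pos heq]
      set m' := m.take j ++ 'X' :: m.drop (j+1) with hm'
      have hlen' : j + 1 + d = m'.length := by
        simp [hm', htlen, List.length_drop]; omega
      rw [ih (j+1) m' (by omega) hlen']
      have htake' : m'.take (j+1) = m.take j ++ ['X'] := by
        rw [hm', List.take_append, htlen]
        simp
      have hget' : m'.getD (j+1-1) ' ' = 'X' := by
        rw [hm', List.getD_eq_getElem?_getD]
        rw [show j + 1 - 1 = j from rfl]
        rw [List.getElem?_append_right (by omega)]
        simp [htlen]
      have hdrop' : m'.drop (j+1) = m.drop (j+1) := by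
        rw [hm', show j + 1 = (m.take j).length + 1 by omega, List.drop_append]
        simp
      rw [htake', hget', hdrop', hdj, dscan_cons]
      have hcond : m.getD (j-1) ' ' = m[j] := by rw [heq, hgD]
      rw [if_pos hcond]
      simp
    · rw [if_neg heq]
      rw [ih (j+1) m (by omega) (by omega)]
      have htake : m.take (j+1) = m.take j ++ [m[j]] := by
        rw [List.take_add_one]
        simp [List.getElem?_eq_some_iff.mpr ⟨hj, rfl⟩]
      have hgetj : m.getD (j+1-1) ' ' = m[j] := by simpa using hgD
      rw [hgetj, hdj, dscan_cons]
      rw [if_neg (by rw [hgD] at heq; exact heq)]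
      rw [htake]
      simp only [List.append_assoc, List.singleton_append]

theorem dedupLoopA_eq (m : List Char) :
    dedupLoopA m = match m with
      | [] => []
      | c :: t => c :: dscan c t := by
  match m with
  | [] => simp [dedupLoopA]
  | c :: t =>
    unfold dedupLoopA
    have hlen : (c :: t).length = t.length + 1 := by simp
    rw [hlen, List.range_eq_range', List.range'_succ, List.foldl_cons]
    rw [if_neg (by simp)]
    rw [dedup_fold t.length 1 (c :: t) (by omega) (by simp [Nat.add_comm])]
    simp

theorem dscan_sjoin (r : List Char) (hsp : ∀ x ∈ r, x ≠ ' ') :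
    ∀ p, p ≠ ' ' → dscan p (sjoin r) = sjoin' r := by
  induction r using sjoin.induct with
  | case1 a b r' ih =>
    intro p hp
    have ha : a ≠ ' ' := hsp a (by simp)
    have hb : b ≠ ' ' := hsp b (by simp)
    have hsp' : ∀ x ∈ r', x ≠ ' ' := fun x hx => hsp x (by simp [hx])
    rw [show sjoin (a :: b :: r') = ' ' :: a :: b :: sjoin r' from rfl]
    rw [dscan_cons, if_neg hp, dscan_cons, if_neg (fun h => ha h.symm), dscan_cons]
    have hb' : (if a = b then 'X' else b) ≠ ' ' := by
      split
      · decide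
      · exact hb
    rw [ih hsp' _ hb']
    rfl
  | case2 r hne =>
    intro p hp
    rcases r with _ | ⟨x, _ | ⟨y, r'⟩⟩
    · simp [sjoin, sjoin', dscan_nil]
    · simp [sjoin, sjoin', dscan_nil]
    · exact absurd rfl (hne x y r')

-- ===== VERDICT (by name: the statement is the Claim_ definition above) =====
theorem formatInput_playfair_spec : Claim_equal_formatInput_playfair := by
  intro plaintext _hdom
  unfold Spec_formatInput_playfair formatInput_playfair formatInput_playfair_alt
  simp only []
  set t := plaintext.toList with ht
  set F := (t.filter (fun c => PySem.Chars.isalpha c)).map PySem.Chars.upperChar with hF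
  have hA2 : expandLoopA (removeNonalpha t) (removeNonalpha t).length 0 = F.flatMap expW := by
    rw [removeNonalpha_eq t, ← hF, expandLoopA_eq F F.length 0 rfl]
    simp
  have hB1 : t.flatMap (fun c =>
      if PySem.Chars.isalpha c = true then
        (if PySem.Chars.upperChar c = 'W' then ['V', 'V'] else [PySem.Chars.upperChar c])
      else []) = F.flatMap expW := lettersB_eq t
  rw [hA2, hB1]
  set L0 := F.flatMap expW with hL0
  have hpad : (if L0.length % 2 > 0 then L0 ++ ['X'] else L0)
      = (if L0.length % 2 = 1 then L0 ++ ['X'] else L0) := by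
    have : L0.length % 2 = 0 ∨ L0.length % 2 = 1 := by omega
    rcases this with h | h <;> simp [h]
  rw [hpad]
  set L := (if L0.length % 2 = 1 then L0 ++ ['X'] else L0) with hL
  have heven : L.length % 2 = 0 := by
    rw [hL]
    split
    · simp; omega
    · omega
  have hsp : ∀ x ∈ L, x ≠ ' ' := by
    intro x hx
    have hx0 : x ∈ L0 ∨ x = 'X' := by
      rw [hL] at hx
      split at hx
      · rcases List.mem_append.mp hx with h | h
        · exact Or.inl h
        · simp at h; exact Or.inr h
      · exact Or.inl hx
    rcases hx0 with h | h
    · rw [hL0] at h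
      rcases List.mem_flatMap.mp h with ⟨c, hc, hxc⟩
      rcases List.mem_map.mp (hF ▸ hc) with ⟨c0, hc0, hcc⟩
      have halpha : PySem.Chars.isalpha c0 = true := (List.mem_filter.mp hc0).2
      unfold expW at hxc
      split at hxc
      · simp at hxc
        rw [hxc]; decide
      · simp at hxc
        rw [hxc, ← hcc]
        exact upper_ne_space c0 halpha
    · rw [h]; decide
  rw [spacedLoopA_eq L heven]
  rcases hLm : L with _ | ⟨a, _ | ⟨b, r⟩⟩
  · simp [chunk2, joinSpaceB, pairLoopB, dedupLoopA]
  · rw [hLm] at heven; simp at heven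
  · rw [hLm] at hsp
    have hra : a ≠ ' ' := hsp a (by simp)
    have hrb : b ≠ ' ' := hsp b (by simp)
    have hrs : ∀ x ∈ r, x ≠ ' ' := fun x hx => hsp x (by simp [hx])
    rw [joinSpaceB_chunk2, dedupLoopA_eq]
    simp only []
    rw [dscan_cons]
    have hb' : (if a = b then 'X' else b) ≠ ' ' := by
      split
      · decide
      · exact hrb
    rw [dscan_sjoin r hrs _ hb']
    rw [joinSpaceB_pairLoopB]
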